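-- pv_equiv track=rewrite | github.com/jaczhi/cram-classification | cramcuts/utils.py | range_to_ternary
-- ===== SOURCE A (Python) =====
-- from typing import List
--
-- def range_to_ternary(num_range: tuple[int, int], bit_width: int) -> List[str]:
--     """
--     Converts a numerical range to a minimal list of ternary strings.
--     This is a port of the `range2prefix` function often found in packet
--     classification literature.
--     """
--     start, end = num_range
--     result = []
--     while start <= end:
--         # Find the largest block that starts at 'start' and does not exceed 'end'.
--         # This is equivalent to finding the longest prefix of 'start' that also
--         # covers a range within 'end'.
--         # 'l' is the number of trailing '*' in the ternary string.
--         for l in range(bit_width + 1):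
--             mask = (1 << l) - 1
--             # Check if the block starting at 'start' is aligned and doesn't exceed 'end'
--             if (start | mask) > end or (start & mask) != 0:
--                 l -= 1
--                 break
--
--         # Convert the block to a ternary string
--         prefix = start >> l
--         ternary = ""
--         for i in range(bit_width - l):
--             ternary += '1' if (prefix >> (bit_width - l - 1 - i)) & 1 else '0'
--         ternary += '*' * l
--         result.append(ternary)
--
--         start += (1 << l)
--     return result
-- ===== SOURCE B (Python) =====
-- from typing import List
--
--
-- def _gcd(a: int, b: int) -> int:
--     a, b = abs(a), abs(b)
--     while b:
--         a, b = b, a % b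
--     return a
--
--
-- def range_to_ternary(num_range: tuple[int, int], bit_width: int) -> List[str]:
--     """
--     Converts a numerical range to a minimal list of ternary strings.
--     Greedy prefix decomposition with closed-form block sizing: the block
--     length is read off gcd/bit_length arithmetic instead of a linear scan,
--     and each prefix string comes straight from bin() instead of a bit loop.
--     """
--     start, end = num_range
--     result = []
--     while start <= end:
--         # largest aligned block at 'start': gcd(start, 2**w) = 2**min(w, trailing zeros)
--         l = _gcd(start, 1 << bit_width).bit_length() - 1
--         # cap by the room remaining up to 'end'
--         l = min(l, (end - start + 1).bit_length() - 1)
--         n = bit_width - l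
--         x = (start >> l) & ((1 << n) - 1)
--         result.append(bin(x | (1 << n))[3:] + '*' * l)
--         start += 1 << l
--     return result
-- ===== Notes on version B (the rewrite author's own statement) =====
-- stated objective: alternative
-- what changed: A's inner linear scan for the block length and its bit-by-bit string loop are replaced by closed-form integer arithmetic: the block length is read off gcd(start, 2**bit_width).bit_length() capped by the room's bit_length, and each prefix string is produced directly with bin(); only the outer greedy loop over the range remains.
import Mathlib
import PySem

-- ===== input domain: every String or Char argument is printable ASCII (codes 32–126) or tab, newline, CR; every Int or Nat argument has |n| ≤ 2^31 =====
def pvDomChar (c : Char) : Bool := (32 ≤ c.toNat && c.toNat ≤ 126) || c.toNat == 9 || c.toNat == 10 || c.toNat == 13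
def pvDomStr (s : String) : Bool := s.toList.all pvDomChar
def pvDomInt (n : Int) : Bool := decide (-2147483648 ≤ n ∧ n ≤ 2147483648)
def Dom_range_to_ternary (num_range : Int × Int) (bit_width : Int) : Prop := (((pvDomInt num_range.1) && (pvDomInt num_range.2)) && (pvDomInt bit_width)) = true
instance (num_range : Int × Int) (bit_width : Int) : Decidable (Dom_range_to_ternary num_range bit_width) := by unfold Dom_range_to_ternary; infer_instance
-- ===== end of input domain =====

-- B replaces A's inner scan for the block length and its per-bit string loop by
-- gcd/bit_length arithmetic and bin(); same greedy outer loop, same output.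

-- ===== PORT A =====
-- A's inner `for l in range(bit_width + 1)` search with its break/decrement;
-- if the loop runs to completion, Python leaves l = bit_width (= the `else` value l - 1 at l = bit_width + 1).
def findLGo (s e bw l : Int) : Int :=
  if _h : l ≤ bw then
    if PySem.Int.bor s ((1 <<< l.toNat) - 1) > e ∨ PySem.Int.band s ((1 <<< l.toNat) - 1) ≠ 0 then
      l - 1
    else
      findLGo s e bw (l + 1)
  else l - 1
termination_by (bw + 1 - l).toNat
decreasing_by omega

-- A's `for i in range(bit_width - l)` bit-by-bit string build
def buildBits (p n : Int) : List Char :=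
  (PySem.List.pyRange 0 n).foldl
    (fun acc i => acc ++ [if PySem.Int.band (p >>> (n - 1 - i).toNat) 1 ≠ 0 then '1' else '0']) []

def aLoop (e bw s : Int) (acc : List String) : List String :=
  if _h : s ≤ e then
    let l := findLGo s e bw 0
    let tern := String.ofList (buildBits (s >>> l.toNat) (bw - l) ++ List.replicate l.toNat '*')
    aLoop e bw (s + (1 <<< l.toNat)) (acc ++ [tern])
  else acc
termination_by (e + 1 - s).toNat
decreasing_by
  have : (0:Int) < ((2:Nat):Int) ^ (findLGo s e bw 0).toNat := by positivity
  omega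

def range_to_ternary (num_range : Int × Int) (bit_width : Int) : List String :=
  aLoop num_range.2 bit_width num_range.1 []

-- ===== PORT B =====
-- the `while b:` Euclid loop inside _gcd
def gcdLoop (a b : Int) : Int :=
  if _h : b ≠ 0 then gcdLoop b (PySem.Int.mod a b) else a
termination_by b.natAbs
decreasing_by
  rcases lt_trichotomy 0 b with hb | hb | hb
  · have h1 := PySem.Int.mod_nonneg a hb
    have h2 := PySem.Int.mod_lt a hb
    omega
  · omega
  · have h1 := PySem.Int.mod_neg_bounds a hb
    omega

def pyGcd (a b : Int) : Int := gcdLoop |a| |b|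

-- binary digits of x, MSB first (bin(x) without the '0b'; [] for x = 0)
def pyBinDigits (x : Nat) : List Char :=
  if x = 0 then [] else pyBinDigits (x / 2) ++ [if x % 2 = 1 then '1' else '0']
decreasing_by omega

-- Python's bin(y); exact for 0 ≤ y (B only applies it to nonnegative values)
def pyBin (y : Int) : List Char :=
  '0' :: 'b' :: (if y.toNat = 0 then ['0'] else pyBinDigits y.toNat)

def bLoop (e bw s : Int) (acc : List String) : List String :=
  if _h : s ≤ e then
    let l0 : Int := (PySem.Int.bitLength (pyGcd s ((1:Int) <<< bw.toNat)) : Int) - 1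
    let l : Int := min l0 ((PySem.Int.bitLength (e - s + 1) : Int) - 1)
    let n := bw - l
    let x := PySem.Int.band (s >>> l.toNat) ((1 <<< n.toNat) - 1)
    -- bin(x | (1 << n))[3:] : s[3:] on this ASCII string is List.drop 3
    let tern := String.ofList ((pyBin (PySem.Int.bor x (1 <<< n.toNat))).drop 3 ++ List.replicate l.toNat '*')
    bLoop e bw (s + (1 <<< l.toNat)) (acc ++ [tern])
  else acc
termination_by (e + 1 - s).toNat
decreasing_by
  have : (0:Int) < ((2:Nat):Int) ^ (min ((PySem.Int.bitLength (pyGcd s ((1:Int) <<< bw.toNat)) : Int) - 1)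
    ((PySem.Int.bitLength (e - s + 1) : Int) - 1)).toNat := by positivity
  omega

def range_to_ternary_alt (num_range : Int × Int) (bit_width : Int) : List String :=
  bLoop num_range.2 bit_width num_range.1 []

-- ===== PRECONDITION & SPEC =====
-- Pre_ excludes exactly the inputs where A raises: for bit_width < 0 and a nonempty
-- range, A's `for l in range(bit_width + 1)` never runs and the subsequent use of l
-- raises NameError (B's `1 << bit_width` raises ValueError there too).
def Pre_range_to_ternary (num_range : Int × Int) (bit_width : Int) : Prop :=
  num_range.1 ≤ num_range.2 → 0 ≤ bit_width
instance (num_range : Int × Int) (bit_width : Int) : Decidable (Pre_range_to_ternary num_range bit_width) := by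
  unfold Pre_range_to_ternary; infer_instance

def pvWitness_range_to_ternary : (Int × Int) × Int := ((0, 3), 2)

def Spec_range_to_ternary (num_range : Int × Int) (bit_width : Int) (out : List String) : Prop := out = range_to_ternary_alt num_range bit_width
instance (num_range : Int × Int) (bit_width : Int) (out : List String) : Decidable (Spec_range_to_ternary num_range bit_width out) := by unfold Spec_range_to_ternary; infer_instance

-- ===== CLAIM (what is proved, stated in full; the proofs are below) =====
def Claim_equal_range_to_ternary : Prop := ∀ (num_range : Int × Int) (bit_width : Int), Dom_range_to_ternary num_range bit_width → Pre_range_to_ternary num_range bit_width → Spec_range_to_ternary num_range bit_width (range_to_ternary num_range bit_width)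

-- ===== LEMMAS AND PROOFS =====

-- proof-side spec of a fixed-width bit string (MSB first)
def padBits : Nat → Int → List Char
  | 0, _ => []
  | N+1, v => padBits N (v/2) ++ [if v % 2 = 1 then '1' else '0']

-- ---- arithmetic readings of the Python bit operations ----

theorem pv_shl (k : Nat) : (1:Int) <<< k = 2^k := by rw [Int.shiftLeft_eq, one_mul]

theorem pv_shl_nat (k : Nat) : ((1 <<< k : Nat) : Int) = 2^k := by
  rw [Nat.shiftLeft_eq, one_mul]; push_cast; ring

theorem pv_shr (s : Int) (k : Nat) : s >>> k = s / 2^k := by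
  rw [Int.shiftRight_eq_div_pow]; norm_num

theorem nat_lor_even_even (a b : Nat) : (2*a) ||| (2*b) = 2*(a ||| b) := by
  have h := Nat.bitwise_bit (f := or) (a := false) (m := a) (b := false) (n := b)
  simpa [Nat.bit, Nat.lor] using h

theorem nat_lor_even_odd (a b : Nat) : (2*a) ||| (2*b+1) = 2*(a ||| b)+1 := by
  have h := Nat.bitwise_bit (f := or) (a := false) (m := a) (b := true) (n := b)
  simpa [Nat.bit, Nat.lor] using h

theorem pv_lor_pow_add (N : Nat) : ∀ v : Nat, v < 2^N → 2^N ||| v = 2^N + v := by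
  induction N with
  | zero => intro v hv; interval_cases v; decide
  | succ N ih =>
    intro v hv
    have hv2 : v / 2 < 2^N := by omega
    rcases Nat.even_or_odd v with ⟨a, ha⟩ | ⟨a, ha⟩
    · have h2 : 2^(N+1) = 2*(2^N) := by ring
      rw [h2, ha, show a + a = 2*a by ring, nat_lor_even_even, ih a (by omega)]; ring
    · have h2 : 2^(N+1) = 2*(2^N) := by ring
      rw [h2, ha, nat_lor_even_odd, ih a (by omega)]; ring

theorem pv_lor_mul_mask (k : Nat) : ∀ q : Nat, (2^k*q) ||| (2^k - 1) = 2^k*q + (2^k - 1) := by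
  induction k with
  | zero => intro q; simp
  | succ k ih =>
    intro q
    have hp : 0 < 2^k := Nat.two_pow_pos k
    have h1 : 2^(k+1)*q = 2*(2^k*q) := by ring
    have h2 : 2^(k+1) - 1 = 2*(2^k - 1)+1 := by omega
    rw [h1, h2, nat_lor_even_odd, ih]
    omega

theorem pv_neg_emod (x L : Int) (hL : 0 < L) : (-x-1) % L = L - 1 - x % L := by
  have hx1 : x % L + L * (x / L) = x := Int.emod_add_ediv x L
  have h1 : -x-1 = (L-1-x%L) + L*(-(x/L)-1) := by ring_nf; omega
  rw [h1, Int.add_mul_emod_self_left]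
  have h2 : 0 ≤ x % L := Int.emod_nonneg x (by omega)
  have h3 : x % L < L := Int.emod_lt_of_pos x hL
  exact Int.emod_eq_of_lt (by omega) (by omega)

-- Python's  s & ((1 << k) - 1)  is  s % 2^k, for every integer s
theorem pv_band_mask (s : Int) (k : Nat) : PySem.Int.band s (2^k - 1) = s % 2^k := by
  have h2 : ((2:Int))^k = ((2^k : Nat) : Int) := by push_cast; ring
  have hpos : 0 < (2^k : Nat) := Nat.two_pow_pos k
  have ht : ((2:Int)^k - 1).toNat = 2^k - 1 := by rw [h2]; omega
  have hmnn : (0:Int) ≤ 2^k - 1 := by rw [h2]; omega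
  by_cases hs : 0 ≤ s
  · rw [PySem.Int.band_of_nonneg hs hmnn, ht, Nat.and_two_pow_sub_one_eq_mod]
    have hcast : ((s.toNat % 2^k : Nat) : Int) = (s.toNat : Int) % ((2^k : Nat) : Int) := by push_cast; ring
    rw [hcast, Int.toNat_of_nonneg hs, ← h2]
  · unfold PySem.Int.band
    rw [if_neg hs, if_pos hmnn, ht, Nat.land_comm, Nat.and_two_pow_sub_one_eq_mod]
    set x := (-s-1).toNat with hxdef
    have hxs : (x : Int) = -s - 1 := by simp [hxdef]; omega
    have hmod := pv_neg_emod (x : Int) (2^k) (by rw [h2]; omega)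
    have hseq : s = -(x:Int) - 1 := by omega
    have hcast : ((x % 2^k : Nat) : Int) = (x : Int) % ((2^k : Nat) : Int) := by push_cast; ring
    have hb : x % 2^k < 2^k := Nat.mod_lt _ hpos
    rw [hseq, hmod]
    rw [h2] at *
    omega

theorem pv_band_one (s : Int) : PySem.Int.band s 1 = s % 2 := by
  have h := pv_band_mask s 1
  norm_num at h
  exact h

-- Python's  s | ((1 << k) - 1)  is  s + (2^k - 1)  when 2^k divides s
theorem pv_bor_aligned (s : Int) (k : Nat) (h : ((2:Int)^k) ∣ s) :
    PySem.Int.bor s (2^k - 1) = s + (2^k - 1) := by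
  have h2 : ((2:Int))^k = ((2^k : Nat) : Int) := by push_cast; ring
  have hpos : 0 < (2^k : Nat) := Nat.two_pow_pos k
  have ht : ((2:Int)^k - 1).toNat = 2^k - 1 := by rw [h2]; omega
  have hmnn : (0:Int) ≤ 2^k - 1 := by rw [h2]; omega
  obtain ⟨c, hc⟩ := h
  rw [h2] at hc ht hmnn ⊢
  by_cases hs : 0 ≤ s
  · rw [PySem.Int.bor_of_nonneg hs hmnn, ht]
    have hc0 : 0 ≤ c := by
      by_contra hneg
      have : ((2^k:Nat):Int) * c < 0 := by
        apply mul_neg_of_pos_of_neg (by exact_mod_cast hpos) (by omega)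
      omega
    have htn : s.toNat = 2^k * c.toNat := by
      have hx : (((2^k:Nat) * c.toNat : Nat) : Int) = ((2^k:Nat):Int) * c := by
        push_cast; rw [show ((c.toNat:Int)) = c from by omega]
      omega
    rw [htn, pv_lor_mul_mask]
    have hx2 : (((2^k:Nat) * c.toNat + (2^k - 1) : Nat) : Int)
        = ((2^k:Nat):Int) * c + (((2^k:Nat)):Int) - 1 := by
      push_cast [Nat.one_le_iff_ne_zero.mpr (Nat.pos_iff_ne_zero.mp hpos)]
      rw [show ((c.toNat:Int)) = c from by omega]; ring
    omega
  · unfold PySem.Int.bor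
    rw [if_neg hs, if_pos hmnn, ht]
    set x := (-s-1).toNat with hxdef
    have hxs : (x : Int) = -s - 1 := by simp [hxdef]; omega
    have hc0 : c < 0 := by
      by_contra hnn
      have : 0 ≤ ((2^k:Nat):Int) * c := by
        apply mul_nonneg (by exact_mod_cast hpos.le) (by omega)
      omega
    have hq : x = 2^k * ((-c).toNat - 1) + (2^k - 1) := by
      have hx : (((2^k:Nat) * ((-c).toNat - 1) + (2^k - 1) : Nat) : Int)
          = ((2^k:Nat):Int) * (-c) - ((2^k:Nat):Int) + (((2^k:Nat)):Int) - 1 := by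
        push_cast [Nat.one_le_iff_ne_zero.mpr (Nat.pos_iff_ne_zero.mp hpos),
          show 1 ≤ (-c).toNat from by omega]
        rw [show (((-c).toNat:Int)) = -c from by omega]; ring
      have hx3 : ((2^k:Nat):Int) * (-c) = -(((2^k:Nat):Int) * c) := by ring
      omega
    have hmod : x &&& (2^k - 1) = 2^k - 1 := by
      rw [Nat.and_two_pow_sub_one_eq_mod, hq, Nat.add_comm, Nat.mul_comm, Nat.add_mul_mod_self_right]
      exact Nat.mod_eq_of_lt (by omega)
    rw [hmod]
    have hx4 : ((x - (2^k - 1) : Nat) : Int) = (x:Int) - (((2^k:Nat)):Int) + 1 := by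
      push_cast [Nat.one_le_iff_ne_zero.mpr (Nat.pos_iff_ne_zero.mp hpos), show 2^k - 1 ≤ x from by omega]
      ring
    omega

-- B also reads  w | (1 << N)  as  2^N + w  for 0 ≤ w < 2^N
theorem pv_bor_pow (w : Int) (N : Nat) (h0 : 0 ≤ w) (hlt : w < 2^N) :
    PySem.Int.bor w ((2:Int)^N) = ((2^N + w.toNat : Nat) : Int) := by
  rw [PySem.Int.bor_of_nonneg h0 (by positivity)]
  have h2 : ((2:Int))^N = ((2^N : Nat) : Int) := by push_cast; ring
  have h1 : ((2:Int)^N).toNat = 2^N := by omega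
  have h3 : w.toNat < 2^N := by omega
  rw [h1, Nat.lor_comm, pv_lor_pow_add N w.toNat h3]

-- ---- the Euclid loop of B computes Nat.gcd ----

theorem pv_gcdLoop_eq (b : Nat) : ∀ a : Nat, gcdLoop ↑a ↑b = ↑(Nat.gcd b a) := by
  induction b using Nat.strong_induction_on with
  | _ b ih =>
    intro a
    rw [gcdLoop]
    by_cases hb : b = 0
    · subst hb; simp
    · rw [dif_pos (by exact_mod_cast hb)]
      rw [PySem.Int.mod_natCast]
      rw [ih (a % b) (Nat.mod_lt _ (Nat.pos_of_ne_zero hb)) b, Nat.gcd_rec b a]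

theorem pv_pyGcd_eq (s : Int) (B : Nat) :
    pyGcd s ((2^B : Nat) : Int) = ↑(Nat.gcd (2^B) s.natAbs) := by
  unfold pyGcd
  have h1 : |s| = (s.natAbs : Int) := Int.abs_eq_natAbs s
  have h2 : |((2^B : Nat) : Int)| = ((2^B : Nat) : Int) := by
    rw [abs_of_nonneg (by positivity)]
  rw [h1, h2, pv_gcdLoop_eq]

-- gcd(s, 2^B) is the power of two 2^j with:  l ≤ j  ⟺  l ≤ B and 2^l ∣ s
theorem pv_gcd_char (s : Int) (B : Nat) :
    ∃ j, j ≤ B ∧ Nat.gcd (2^B) s.natAbs = 2^j ∧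
      (∀ l : Nat, l ≤ j ↔ (l ≤ B ∧ ((2:Int)^l ∣ s))) := by
  have hdvd_iff : ∀ l : Nat, ((2:Int)^l ∣ s) ↔ (2^l ∣ s.natAbs) := by
    intro l
    constructor
    · intro h; exact Int.ofNat_dvd_left.mp (by exact_mod_cast h)
    · intro h; exact_mod_cast Int.ofNat_dvd_left.mpr h
  by_cases hs : s = 0
  · refine ⟨B, le_rfl, by simp [hs], fun l => ?_⟩
    simp [hs]
  · have hna : s.natAbs ≠ 0 := by simpa using hs
    obtain ⟨t, m, hm, hnm⟩ := Nat.exists_eq_two_pow_mul_odd hna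
    have hdvd_t : ∀ l : Nat, (2^l ∣ s.natAbs) ↔ l ≤ t := by
      intro l
      constructor
      · intro h
        by_contra hlt
        have h1 : 2^(t+1) ∣ s.natAbs := dvd_trans (Nat.pow_dvd_pow 2 (by omega)) h
        rw [hnm] at h1
        have h2 : 2^t*2 ∣ 2^t*m := by
          have : (2:Nat)^(t+1) = 2^t*2 := by ring
          rwa [this] at h1
        have h3 : 2 ∣ m := (Nat.mul_dvd_mul_iff_left (Nat.two_pow_pos t)).mp h2
        rw [Nat.odd_iff] at hm
        omega
      · intro h
        rw [hnm]
        exact dvd_mul_of_dvd_left (Nat.pow_dvd_pow 2 h) m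
    refine ⟨min B t, by omega, ?_, fun l => ?_⟩
    · by_cases hBt : B ≤ t
      · rw [Nat.gcd_eq_left ((hdvd_t B).mpr hBt), Nat.min_eq_left hBt]
      · have ht : t < B := by omega
        rw [hnm, show (2:Nat)^B = 2^t * 2^(B-t) by rw [← pow_add]; congr 1; omega,
          Nat.gcd_mul_left]
        have hcop : Nat.Coprime (2^(B-t)) m := Nat.Coprime.pow_left _ (Nat.coprime_two_left.mpr hm)
        rw [Nat.Coprime.gcd_eq_one hcop, Nat.min_eq_right ht.le]
        ring
    · rw [hdvd_iff, hdvd_t]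
      omega

-- ---- bit_length facts ----

theorem pv_bitLength_two_pow (j : Nat) : PySem.Int.bitLength ((2^j : Nat) : Int) = j + 1 := by
  have hna : (((2^j : Nat)) : Int).natAbs = 2^j := by simp
  have h1 := PySem.Int.lt_two_pow_bitLength (((2^j : Nat)) : Int)
  have h2 := PySem.Int.two_pow_bitLength_le (((2^j : Nat)) : Int) (by positivity)
  rw [hna] at h1 h2
  have h3 : j < PySem.Int.bitLength ((2^j : Nat) : Int) :=
    (Nat.pow_lt_pow_iff_right (by norm_num)).mp h1
  have h4 : PySem.Int.bitLength ((2^j : Nat) : Int) - 1 ≤ j :=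
    (Nat.pow_le_pow_iff_right (by norm_num)).mp h2
  omega

theorem pv_bitLength_le_iff (v : Int) (hv : 1 ≤ v) (l : Nat) :
    (2:Int)^l ≤ v ↔ l ≤ PySem.Int.bitLength v - 1 := by
  have h1 := PySem.Int.lt_two_pow_bitLength v
  have h2 := PySem.Int.two_pow_bitLength_le v (by omega)
  have hna : v.natAbs = v.toNat := by omega
  rw [hna] at h1 h2
  obtain ⟨b, hbdef⟩ : ∃ b, b = PySem.Int.bitLength v := ⟨_, rfl⟩
  rw [← hbdef] at h1 h2 ⊢
  have hb1 : 1 ≤ b := by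
    by_contra hb0
    have hz : b = 0 := by omega
    rw [hz] at h1; norm_num at h1; omega
  have hcast : ((2:Int)^l ≤ v ↔ (2:Nat)^l ≤ v.toNat) := by
    have hh : ((2:Int))^l = ((2^l : Nat) : Int) := by push_cast; ring
    rw [hh]; omega
  rw [hcast]
  constructor
  · intro h
    have hlt : (2:Nat)^l < 2^b := by omega
    have := (Nat.pow_lt_pow_iff_right (a := 2) (n := l) (m := b) (by norm_num)).mp hlt
    omega
  · intro h
    have : (2:Nat)^l ≤ 2^(b-1) := (Nat.pow_le_pow_iff_right (by norm_num)).mpr h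
    omega

theorem pv_bitLength_pos (v : Int) (hv : 1 ≤ v) : 1 ≤ PySem.Int.bitLength v := by
  have h2 := PySem.Int.lt_two_pow_bitLength v
  by_contra hb0
  have hz : PySem.Int.bitLength v = 0 := by omega
  rw [hz] at h2; norm_num at h2; omega

-- ---- A's search loop returns min j r ----

theorem pv_nobreak (s e bw : Int) (j r : Nat)
    (hj : ∀ l : Nat, l ≤ j ↔ (l ≤ bw.toNat ∧ ((2:Int)^l ∣ s)))
    (hr : ∀ l : Nat, l ≤ r ↔ ((2:Int)^l ≤ e - s + 1))
    (lc : Nat) (hlc : lc ≤ min j r) :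
    ¬ (PySem.Int.bor s ((1 <<< ((lc:Int)).toNat) - 1) > e ∨
       PySem.Int.band s ((1 <<< ((lc:Int)).toNat) - 1) ≠ 0) := by
  have htn : ((lc:Int)).toNat = lc := Int.toNat_natCast lc
  rw [htn, pv_shl_nat]
  have hdvd : (2:Int)^lc ∣ s := ((hj lc).mp (by omega)).2
  have hle : (2:Int)^lc ≤ e - s + 1 := (hr lc).mp (by omega)
  rw [pv_bor_aligned s lc hdvd, pv_band_mask]
  push_neg
  exact ⟨by omega, Int.emod_eq_zero_of_dvd hdvd⟩

theorem pv_final (s e bw : Int) (hbw : 0 ≤ bw) (j r : Nat) (hjB : (j:Int) ≤ bw)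
    (hj : ∀ l : Nat, l ≤ j ↔ (l ≤ bw.toNat ∧ ((2:Int)^l ∣ s)))
    (hr : ∀ l : Nat, l ≤ r ↔ ((2:Int)^l ≤ e - s + 1)) :
    findLGo s e bw (↑(min j r) + 1) = ↑(min j r) := by
  rw [findLGo]
  by_cases hgt : ((min j r : Nat) : Int) + 1 ≤ bw
  · rw [dif_pos hgt]
    have htn : ((((min j r : Nat) : Int)) + 1).toNat = min j r + 1 := by omega
    rw [htn, pv_shl_nat]
    have hbrk : PySem.Int.bor s ((2:Int)^(min j r + 1) - 1) > e ∨
        PySem.Int.band s ((2:Int)^(min j r + 1) - 1) ≠ 0 := by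
      by_cases hdvd : (2:Int)^(min j r + 1) ∣ s
      · left
        have hjge : min j r + 1 ≤ j := (hj _).mpr ⟨by omega, hdvd⟩
        have hnr : ¬ (min j r + 1 ≤ r) := by omega
        have := (hr (min j r + 1))
        have hgt2 : (2:Int)^(min j r + 1) > e - s + 1 := by
          by_contra hle; exact hnr (this.mpr (by omega))
        rw [pv_bor_aligned s _ hdvd]
        have hpos : (0:Int) < 2^(min j r + 1) := by positivity
        omega
      · right
        rw [pv_band_mask]
        intro h0
        exact hdvd (Int.dvd_of_emod_eq_zero h0)
    rw [if_pos hbrk]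
    omega
  · rw [dif_neg hgt]
    omega

theorem pv_findL (s e bw : Int) (hbw : 0 ≤ bw) (j r : Nat) (hjB : (j:Int) ≤ bw)
    (hj : ∀ l : Nat, l ≤ j ↔ (l ≤ bw.toNat ∧ ((2:Int)^l ∣ s)))
    (hr : ∀ l : Nat, l ≤ r ↔ ((2:Int)^l ≤ e - s + 1)) :
    findLGo s e bw 0 = ↑(min j r) := by
  suffices h : ∀ d lc : Nat, lc + d = min j r → findLGo s e bw ↑lc = ↑(min j r) by
    have := h (min j r) 0 (by omega)
    simpa using this
  intro d
  induction d with
  | zero =>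
    intro lc hlc
    rw [findLGo, dif_pos (by omega : ((lc:Int)) ≤ bw),
      if_neg (pv_nobreak s e bw j r hj hr lc (by omega))]
    have hrw : ((lc:Int)) + 1 = ((min j r : Nat) : Int) + 1 := by omega
    rw [hrw]
    exact pv_final s e bw hbw j r hjB hj hr
  | succ d ih =>
    intro lc hlc
    rw [findLGo, dif_pos (by omega : ((lc:Int)) ≤ bw),
      if_neg (pv_nobreak s e bw j r hj hr lc (by omega))]
    have hrw : ((lc:Int)) + 1 = ((lc + 1 : Nat) : Int) := by omega
    rw [hrw]
    exact ih (lc + 1) (by omega)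

-- ---- both string builds produce padBits ----

theorem pv_emod_div (p : Int) (N : Nat) : (p % 2^(N+1)) / 2 = (p / 2) % 2^N := by
  have hM : (2:Int)^(N+1) = 2^N*2 := by ring
  rw [hM]
  have hMpos : (0:Int) < 2^N := by positivity
  have h1 : 2^N*2 * (p / (2^N*2)) + p % (2^N*2) = p := Int.ediv_add_emod p (2^N*2)
  have hw0 : (0:Int) ≤ p % (2^N*2) := Int.emod_nonneg p (by positivity)
  have hwlt : p % (2^N*2) < 2^N*2 := Int.emod_lt_of_pos p (by positivity)
  have hp2 : p / 2 = (p % (2^N*2)) / 2 + 2^N * (p / (2^N*2)) := by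
    have hrew : p = p % (2^N*2) + (2^N * (p / (2^N*2)))*2 := by linear_combination -h1
    conv_lhs => rw [hrew]
    rw [Int.add_mul_ediv_right _ _ (by norm_num : (2:Int) ≠ 0)]
  rw [hp2, Int.add_mul_emod_self_left]
  exact (Int.emod_eq_of_lt (by omega) (by omega)).symm

theorem pv_emod_parity (p : Int) (N : Nat) : (p % 2^(N+1)) % 2 = p % 2 :=
  Int.emod_emod_of_dvd p (dvd_pow_self 2 (Nat.succ_ne_zero N))

theorem pv_buildBits (N : Nat) : ∀ p : Int, buildBits p ↑N = padBits N (p % 2^N) := by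
  induction N with
  | zero =>
    intro p
    rw [buildBits, PySem.List.pyRange_one_eq_nil (by norm_num)]
    rfl
  | succ N ih =>
    intro p
    have hc : ((N+1 : Nat) : Int) = (N:Int) + 1 := by push_cast; ring
    rw [buildBits, hc,
      PySem.List.pyRange_one_append 0 (↑N) ((N:Int)+1) (by omega) (by omega),
      PySem.List.pyRange_one_singleton,
      List.foldl_append, List.foldl_cons, List.foldl_nil]
    have hfirst : List.foldl
        (fun acc i => acc ++ [if PySem.Int.band (p >>> ((N:Int) + 1 - 1 - i).toNat) 1 ≠ 0 then '1' else '0']) []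
        (PySem.List.pyRange 0 (N:Int))
        = buildBits (p/2) ↑N := by
      rw [buildBits]
      apply PySem.List.foldl_congr_mem
      intro acc i hi
      have hmem := (PySem.List.mem_pyRange_one).mp hi
      have hk : ((N:Int) + 1 - 1 - i).toNat = ((N:Int) - 1 - i).toNat + 1 := by omega
      rw [hk]
      congr 2
      rw [pv_shr, pv_shr]
      rw [show (2:Int)^(((N:Int) - 1 - i).toNat + 1) = 2 * 2^(((N:Int) - 1 - i).toNat) by ring]
      rw [← Int.ediv_ediv_of_nonneg (by norm_num : (0:Int) ≤ 2)]
    have hlast : (if PySem.Int.band (p >>> ((N:Int) + 1 - 1 - (N:Int)).toNat) 1 ≠ 0 then '1' else '0')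
        = (if (p % 2^(N+1)) % 2 = 1 then '1' else '0') := by
      have h0 : ((N:Int) + 1 - 1 - (N:Int)).toNat = 0 := by omega
      rw [h0, show p >>> (0:Nat) = p by rw [pv_shr]; norm_num, pv_band_one, pv_emod_parity]
      have hp01 : p % 2 = 0 ∨ p % 2 = 1 := by omega
      rcases hp01 with h | h <;> simp [h]
    rw [hfirst, hlast, ih (p/2), ← pv_emod_div]
    rfl

theorem pv_binDigits (N : Nat) : ∀ v : Int, 0 ≤ v → v < 2^N →
    pyBinDigits (2^N + v.toNat) = '1' :: padBits N v := by
  induction N with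
  | zero =>
    intro v h0 h1
    have hv : v = 0 := by omega
    subst hv
    rw [pyBinDigits]
    norm_num
    rw [pyBinDigits]
    rfl
  | succ N ih =>
    intro v h0 h1
    have hpN : 0 < (2:Nat)^(N+1) := Nat.two_pow_pos (N+1)
    rw [pyBinDigits, if_neg (by omega)]
    have hsplit : (2:Nat)^(N+1) = 2^N*2 := by ring
    have hIsplit : (2:Int)^(N+1) = 2^N*2 := by ring
    have hdiv : (2^(N+1) + v.toNat)/2 = 2^N + (v/2).toNat := by omega
    have hmod : ((2^(N+1) + v.toNat) % 2 = 1) = (v % 2 = 1) := by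
      apply propext; omega
    rw [hdiv]
    simp only [hmod]
    rw [ih (v/2) (by omega) (by omega)]
    rfl

-- ---- one iteration of both loops agrees, hence the loops agree ----

theorem pv_main (e bw : Int) (hbw : 0 ≤ bw) :
    ∀ (n : Nat) (s : Int) (acc : List String), (e + 1 - s).toNat ≤ n →
      aLoop e bw s acc = bLoop e bw s acc := by
  intro n
  induction n with
  | zero =>
    intro s acc hn
    rw [aLoop, bLoop, dif_neg (by omega : ¬ s ≤ e), dif_neg (by omega : ¬ s ≤ e)]
  | succ n ih =>
    intro s acc hn
    by_cases hse : s ≤ e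
    · obtain ⟨j, hjB, hgcd, hj⟩ := pv_gcd_char s bw.toNat
      have hv1 : (1:Int) ≤ e - s + 1 := by omega
      have hrpos : 1 ≤ PySem.Int.bitLength (e - s + 1) := pv_bitLength_pos _ hv1
      have hr : ∀ l : Nat, l ≤ PySem.Int.bitLength (e - s + 1) - 1 ↔ (2:Int)^l ≤ e - s + 1 :=
        fun l => (pv_bitLength_le_iff _ hv1 l).symm
      have hfind : findLGo s e bw 0 = ↑(min j (PySem.Int.bitLength (e - s + 1) - 1)) :=
        pv_findL s e bw hbw j _ (by omega) hj hr
      have hshl : ((1:Int) <<< bw.toNat) = ((2^bw.toNat : Nat) : Int) := by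
        rw [pv_shl]; push_cast; ring
      have hgc : pyGcd s ((1:Int) <<< bw.toNat) = ((2^j : Nat) : Int) := by
        rw [hshl, pv_pyGcd_eq, hgcd]
      have hbl : PySem.Int.bitLength (pyGcd s ((1:Int) <<< bw.toNat)) = j + 1 := by
        rw [hgc]; exact pv_bitLength_two_pow j
      have hlB : min ((PySem.Int.bitLength (pyGcd s ((1:Int) <<< bw.toNat)) : Int) - 1)
          ((PySem.Int.bitLength (e - s + 1) : Int) - 1)
          = ((min j (PySem.Int.bitLength (e - s + 1) - 1) : Nat) : Int) := by
        rw [hbl]; push_cast; omega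
      rw [aLoop, bLoop, dif_pos hse, dif_pos hse]
      simp only [hfind, hlB]
      set m : Nat := min j (PySem.Int.bitLength (e - s + 1) - 1) with hmdef
      have hterm : ((1 <<< m : Nat) : Int) = 2^m := pv_shl_nat m
      have hmbw : (m:Int) ≤ bw := by omega
      have hstr : String.ofList (buildBits (s >>> ((m:Int)).toNat) (bw - (m:Int)) ++
            List.replicate ((m:Int)).toNat '*')
          = String.ofList (List.drop 3 (pyBin (PySem.Int.bor
              (PySem.Int.band (s >>> ((m:Int)).toNat) (↑(1 <<< (bw - (m:Int)).toNat) - 1))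
              (↑(1 <<< (bw - (m:Int)).toNat)))) ++ List.replicate ((m:Int)).toNat '*') := by
        have hNdef : bw - (m:Int) = (((bw - (m:Int)).toNat : Nat) : Int) := by omega
        set N := (bw - (m:Int)).toNat with hN
        set p := s >>> ((m:Int)).toNat with hp
        have hw0 : (0:Int) ≤ p % 2^N := Int.emod_nonneg p (by positivity)
        have hwlt : p % 2^N < 2^N := Int.emod_lt_of_pos p (by positivity)
        rw [hNdef, pv_buildBits N p, pv_shl_nat, pv_band_mask, pv_bor_pow _ N hw0 hwlt, pyBin]
        simp only [Int.toNat_natCast]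
        rw [if_neg (by have := Nat.two_pow_pos N; omega), pv_binDigits N (p % 2^N) hw0 hwlt]
        rfl
      rw [hstr]
      apply ih
      have h1 : (1:Int) ≤ ((1 <<< ((m:Int)).toNat : Nat) : Int) := by
        rw [Int.toNat_natCast, hterm]
        have : (0:Int) < 2^m := by positivity
        omega
      omega
    · rw [aLoop, bLoop, dif_neg hse, dif_neg hse]

-- ===== VERDICT (by name: the statement is the Claim_ definition above) =====
theorem range_to_ternary_spec : Claim_equal_range_to_ternary := by
  intro nr bw _ hpre
  unfold Spec_range_to_ternary range_to_ternary range_to_ternary_alt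
  by_cases hse : nr.1 ≤ nr.2
  · exact pv_main nr.2 bw (hpre hse) _ nr.1 [] le_rfl
  · rw [aLoop, bLoop, dif_neg hse, dif_neg hse]
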